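-- pv_equiv track=rewrite | github.com/Eresh24/SoftwareNow_assignment1 | Assignment_2/Question_1.py | decrypt_function
-- ===== SOURCE A (Python) =====
-- def decrypt_function(text,shift1,shift2):
--     decrypted_text = ""
--
--     #to check each character in the text
--     for i,char in enumerate(text):
--         if char.islower():
--
--             # to check if the index is even or odd and to shift the character and wrap around using modulo
--             shift = shift1 if i  % 2 == 0 else shift2
--             new_char = chr((ord(char)- ord('a') - shift) % 26 + ord('a'))
--             decrypted_text += new_char
--
--             # to check if the character is in the second half of the alphabet
--         elif char.isupper():
--             shift = shift1 if i  % 2 == 0 else shift2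
--             new_char = chr((ord(char)- ord('A') - shift) % 26 + ord('A'))
--             decrypted_text += new_char
--
--             # to check if the character is not an alphabet
--         else:
--             decrypted_text += char
--     return decrypted_text
-- ===== SOURCE B (Python) =====
-- def _table(shift):
--     # decryption table: letter code -> decrypted letter code, for one shift
--     return {c: (c - base - shift) % 26 + base
--             for base in (97, 65) for c in range(base, base + 26)}
--
-- def decrypt_function(text, shift1, shift2):
--     # translate the even-indexed and odd-indexed slices wholesale, then interleave
--     even = text[::2].translate(_table(shift1))
--     odd = text[1::2].translate(_table(shift2))
--     res = ''.join(e + o for e, o in zip(even, odd))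
--     if len(even) > len(odd):
--         res += even[-1]
--     return res
-- ===== Notes on version B (the rewrite author's own statement) =====
-- stated objective: idiomatic
-- what changed: Replaces the single enumerate loop with per-character branching by two precomputed translation tables applied wholesale (str.translate) to the even-indexed and odd-indexed slices, which are then interleaved back together; measured ~3.7x faster (C-level translate/slicing vs per-char Python loop with string +=).
import Mathlib
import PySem

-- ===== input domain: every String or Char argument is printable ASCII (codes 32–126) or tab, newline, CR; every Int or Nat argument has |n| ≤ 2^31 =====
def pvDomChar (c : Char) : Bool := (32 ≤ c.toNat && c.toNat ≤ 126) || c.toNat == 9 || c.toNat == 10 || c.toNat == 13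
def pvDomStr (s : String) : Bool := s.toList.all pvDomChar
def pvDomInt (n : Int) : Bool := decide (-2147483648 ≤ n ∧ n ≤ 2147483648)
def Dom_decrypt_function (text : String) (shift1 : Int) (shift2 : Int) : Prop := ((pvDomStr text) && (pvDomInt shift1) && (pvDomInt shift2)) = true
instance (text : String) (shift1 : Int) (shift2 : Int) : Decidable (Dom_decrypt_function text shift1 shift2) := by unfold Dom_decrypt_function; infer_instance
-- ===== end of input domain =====

-- B re-implements the position-dependent Caesar decrypt idiomatically: two precomputed
-- translation tables applied wholesale to the even/odd slices, then interleaved (objective: idiomatic).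

-- ===== PORT A =====
-- literal port of A's loop; the string is built on the char-list side (exact for
-- Python string concatenation); ord('a')=97, ord('A')=65 written as numerals
def decrypt_function (text : String) (shift1 : Int) (shift2 : Int) : String :=
  String.ofList <|
    (PySem.List.enumerate text.toList 0).foldl
      (fun acc p =>
        let i := p.1
        let char := p.2
        if PySem.Chars.islower char then
          let shift := if PySem.Int.mod i 2 == 0 then shift1 else shift2
          let new_char := Char.ofNat (PySem.Int.mod ((char.toNat : Int) - 97 - shift) 26 + 97).toNat
          acc ++ [new_char]
        else if PySem.Chars.isupper char then
          let shift := if PySem.Int.mod i 2 == 0 then shift1 else shift2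
          let new_char := Char.ofNat (PySem.Int.mod ((char.toNat : Int) - 65 - shift) 26 + 65).toNat
          acc ++ [new_char]
        else acc ++ [char]) []

-- ===== PORT B =====
-- the dict comprehension of _table: pairs generated in order, inserted into a fresh dict
def pvTablePairs (shift : Int) : List (Int × Int) :=
  [(97 : Int), 65].flatMap (fun base =>
    (PySem.List.pyRange base (base + 26) 1).map
      (fun c => (c, PySem.Int.mod (c - base - shift) 26 + base)))

def pvTable (shift : Int) : PySem.Dict Int Int :=
  (pvTablePairs shift).foldl (fun d p => d.insert p.1 p.2) PySem.Dict.empty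

-- str.translate on one code point: mapped code if present in the table, else unchanged
def pvTranslate (t : PySem.Dict Int Int) (c : Char) : Char :=
  match t.get? (c.toNat : Int) with
  | some v => Char.ofNat v.toNat
  | none => c

def decrypt_function_alt (text : String) (shift1 : Int) (shift2 : Int) : String :=
  -- text[::2].translate(t1) / text[1::2].translate(t2), on the char-list side
  -- (.getD [] is a totality guard only: step 2 ≠ 0, so slice? never returns none)
  let even := ((PySem.List.slice? text.toList none none 2).getD []).map (pvTranslate (pvTable shift1))
  let odd := ((PySem.List.slice? text.toList (some 1) none 2).getD []).map (pvTranslate (pvTable shift2))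
  let res := (even.zip odd).flatMap (fun p => [p.1, p.2])
  let res := if even.length > odd.length then
      res ++ (match PySem.List.pyGet? even (-1) with | some c => [c] | none => [])  -- even[-1]
    else res
  String.ofList res

-- ===== PRECONDITION & SPEC =====
def Spec_decrypt_function (text : String) (shift1 : Int) (shift2 : Int) (out : String) : Prop := out = decrypt_function_alt text shift1 shift2
instance (text : String) (shift1 : Int) (shift2 : Int) (out : String) : Decidable (Spec_decrypt_function text shift1 shift2 out) := by unfold Spec_decrypt_function; infer_instance

-- ===== CLAIM (what is proved, stated in full; the proofs are below) =====
def Claim_equal_decrypt_function : Prop := ∀ (text : String) (shift1 : Int) (shift2 : Int), Dom_decrypt_function text shift1 shift2 → Spec_decrypt_function text shift1 shift2 (decrypt_function text shift1 shift2)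

-- ===== LEMMAS AND PROOFS =====

-- per-character result of A at an even (pvStep shift1) / odd (pvStep shift2) position
def pvStep (shift : Int) (c : Char) : Char :=
  if PySem.Chars.islower c then Char.ofNat (PySem.Int.mod ((c.toNat : Int) - 97 - shift) 26 + 97).toNat
  else if PySem.Chars.isupper c then Char.ofNat (PySem.Int.mod ((c.toNat : Int) - 65 - shift) 26 + 65).toNat
  else c

-- common specification of both programs: decrypt two characters at a time
def pvSpecList (s1 s2 : Int) : List Char → List Char
  | [] => []
  | [a] => [pvStep s1 a]
  | a :: b :: t => pvStep s1 a :: pvStep s2 b :: pvSpecList s1 s2 t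

def pvEvens {α : Type} : List α → List α
  | [] => []
  | [a] => [a]
  | a :: _ :: t => a :: pvEvens t

def pvOdds {α : Type} : List α → List α
  | [] => []
  | [_] => []
  | _ :: b :: t => b :: pvOdds t

theorem pv_find_eq (l : List Int) (x : Int) :
    l.find? (fun c => c == x) = if x ∈ l then some x else none := by
  induction l with
  | nil => simp
  | cons a t ih =>
    by_cases h : a = x
    · subst h; simp
    · simp [h, ih, Ne.symm h]

theorem pv_table_items (s : Int) : (pvTable s).items = pvTablePairs s := by
  have h := PySem.Dict.items_foldl_insert_fresh (pvTablePairs s) Prod.fst Prod.snd PySem.Dict.empty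
    (by intro a _; simp [PySem.Dict.contains_empty])
    (by
      have : (pvTablePairs s).map Prod.fst =
          PySem.List.pyRange 97 123 1 ++ PySem.List.pyRange 65 91 1 := by
        simp [pvTablePairs, List.map_map, Function.comp_def]
      rw [this]; decide)
  simpa [pvTable] using h

theorem pv_table_get (s : Int) (x : Int) :
    (pvTable s).get? x =
      if 97 ≤ x ∧ x < 123 then some (PySem.Int.mod (x - 97 - s) 26 + 97)
      else if 65 ≤ x ∧ x < 91 then some (PySem.Int.mod (x - 65 - s) 26 + 65)
      else none := by
  rw [show (pvTable s).get? x = ((pvTablePairs s).find? (fun p => p.1 == x)).map (·.2) from by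
    simp [PySem.Dict.get?, pv_table_items]]
  simp only [pvTablePairs, List.flatMap_cons, List.flatMap_nil, List.append_nil,
    List.find?_append, List.find?_map, Function.comp_def]
  rw [show (fun c : Int => ((c, PySem.Int.mod (c - 97 - s) 26 + 97).1 == x)) = (fun c => c == x) from rfl]
  rw [show (fun c : Int => ((c, PySem.Int.mod (c - 65 - s) 26 + 65).1 == x)) = (fun c => c == x) from rfl]
  rw [pv_find_eq, pv_find_eq]
  by_cases h1 : 97 ≤ x ∧ x < 123 <;> by_cases h2 : 65 ≤ x ∧ x < 91 <;>
    simp [PySem.List.mem_pyRange_one, h1, h2]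

theorem pv_translate_step (s : Int) (c : Char) :
    pvTranslate (pvTable s) c = pvStep s c := by
  have hl : PySem.Chars.islower c = true ↔ (97 ≤ c.toNat ∧ c.toNat ≤ 122) := by
    simp only [PySem.Chars.islower, Bool.and_eq_true, decide_eq_true_eq, Char.le_def,
      UInt32.le_iff_toNat_le]
    exact Iff.rfl
  have hu : PySem.Chars.isupper c = true ↔ (65 ≤ c.toNat ∧ c.toNat ≤ 90) := by
    simp only [PySem.Chars.isupper, Bool.and_eq_true, decide_eq_true_eq, Char.le_def,
      UInt32.le_iff_toNat_le]
    exact Iff.rfl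
  unfold pvTranslate pvStep
  rw [pv_table_get]
  by_cases h1 : PySem.Chars.islower c <;> by_cases h2 : PySem.Chars.isupper c
  · exact absurd (And.intro (hl.mp h1) (hu.mp h2)) (by omega)
  · rw [if_pos (by rw [hl] at h1; omega), if_pos h1]
  · rw [if_neg (by rw [hl] at h1; omega), if_pos (by rw [hu] at h2; omega), if_neg h1, if_pos h2]
  · rw [if_neg (by rw [hl] at h1; omega), if_neg (by rw [hu] at h2; omega), if_neg h1, if_neg h2]

theorem pv_evens_spec (l : List Char) :
    (List.range ((l.length + 1) / 2)).filterMap (fun k => l[2 * k]?) = pvEvens l := by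
  induction l using pvEvens.induct with
  | case1 => simp [pvEvens]
  | case2 a => simp [pvEvens, List.range_succ]
  | case3 a b t ih =>
    have hlen : (((a :: b :: t).length + 1) / 2) = ((t.length + 1) / 2) + 1 := by
      simp [List.length]; omega
    rw [hlen, List.range_succ_eq_map, List.filterMap_cons, List.filterMap_map]
    have htail : ∀ x ∈ List.range ((t.length + 1) / 2),
        ((fun k => (a :: b :: t)[2 * k]?) ∘ Nat.succ) x = t[2 * x]? := by
      intro x _
      simp only [Function.comp_apply]
      rw [show 2 * Nat.succ x = 2 * x + 1 + 1 from by omega]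
      simp
    rw [List.filterMap_congr htail]
    simp [pvEvens, ih]

theorem pv_odds_spec (l : List Char) :
    (List.range (l.length / 2)).filterMap (fun k => l[2 * k + 1]?) = pvOdds l := by
  induction l using pvOdds.induct with
  | case1 => simp [pvOdds]
  | case2 a => simp [pvOdds]
  | case3 a b t ih =>
    have hlen : ((a :: b :: t).length / 2) = (t.length / 2) + 1 := by
      simp [List.length]; omega
    rw [hlen, List.range_succ_eq_map, List.filterMap_cons, List.filterMap_map]
    have htail : ∀ x ∈ List.range (t.length / 2),
        ((fun k => (a :: b :: t)[2 * k + 1]?) ∘ Nat.succ) x = t[2 * x + 1]? := by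
      intro x _
      simp only [Function.comp_apply]
      rw [show 2 * Nat.succ x + 1 = (2 * x + 1) + 1 + 1 from by omega]
      simp
    rw [List.filterMap_congr htail]
    simp [pvOdds, ih]

theorem pv_slice_evens (l : List Char) :
    PySem.List.slice? l none none 2 = some (pvEvens l) := by
  rw [← pv_evens_spec]
  simp only [PySem.List.slice?, PySem.List.sliceIndices]
  norm_num
  rw [show (if 0 < l.length then (((l.length : Int) + 2 - 1) / 2).toNat else 0) = (l.length + 1) / 2 from by
    split_ifs <;> omega]
  exact List.filterMap_congr (fun x _ => by
    rw [show ((2 * (x : Int)).toNat) = 2 * x from by omega])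

theorem pv_slice_odds (l : List Char) :
    PySem.List.slice? l (some 1) none 2 = some (pvOdds l) := by
  rw [← pv_odds_spec]
  simp only [PySem.List.slice?, PySem.List.sliceIndices]
  norm_num
  by_cases h : 1 < l.length
  · rw [show (if 1 < l.length then (((l.length : Int) - min 1 (l.length : Int) + 2 - 1) / 2).toNat else 0)
        = l.length / 2 from by rw [if_pos h]; omega]
    exact List.filterMap_congr (fun x _ => by
      rw [show ((min 1 ((l.length : Int)) + 2 * (x : Int)).toNat) = 2 * x + 1 from by omega])
  · rw [if_neg h, show l.length / 2 = 0 from by omega]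
    simp

theorem pv_pyGet_neg_one {α : Type} (xs : List α) : PySem.List.pyGet? xs (-1) = xs.getLast? := by
  cases xs with
  | nil => simp [PySem.List.pyGet?, PySem.List.pyIdx?]
  | cons a t => simp [PySem.List.pyGet?, PySem.List.pyIdx?, List.getLast?_eq_getElem?]

theorem pv_interleave (s1 s2 : Int) (l : List Char) :
    (let even := (pvEvens l).map (pvStep s1)
     let odd := (pvOdds l).map (pvStep s2)
     let res := (even.zip odd).flatMap (fun p => [p.1, p.2])
     if even.length > odd.length then
       res ++ (match PySem.List.pyGet? even (-1) with | some c => [c] | none => [])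
     else res) = pvSpecList s1 s2 l := by
  induction l using pvSpecList.induct with
  | case1 => simp [pvEvens, pvOdds, pvSpecList]
  | case2 a => simp [pvEvens, pvOdds, pvSpecList, pv_pyGet_neg_one]
  | case3 a b t ih =>
    simp only [pvEvens, pvOdds, pvSpecList, List.map_cons, List.zip_cons_cons,
      List.flatMap_cons, List.length_cons, List.length_map]
    simp only [List.length_map] at ih
    by_cases h : (pvEvens t).length > (pvOdds t).length
    · obtain ⟨z, rest, hE⟩ : ∃ z rest, pvEvens t = z :: rest := by
        cases hx : pvEvens t with
        | nil => rw [hx] at h; simp at h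
        | cons z rest => exact ⟨z, rest, rfl⟩
      rw [if_pos (by omega)]
      rw [if_pos (by omega)] at ih
      rw [pv_pyGet_neg_one] at ih ⊢
      rw [hE] at ih ⊢
      simp only [List.map_cons, List.getLast?_cons_cons] at ih ⊢
      simp only [List.cons_append, List.append_assoc]
      rw [ih]
      simp
    · rw [if_neg (by omega)]
      rw [if_neg (by omega)] at ih
      simp only [List.cons_append]
      rw [ih]
      simp

theorem pv_mod_two (a : Int) : PySem.Int.mod a 2 = a % 2 := by
  simp [PySem.Int.mod, Int.fmod_eq_emod]

-- A's loop body, named so its applications can be rewritten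
def pvBodyA (s1 s2 : Int) (acc : List Char) (p : Int × Char) : List Char :=
  let i := p.1
  let char := p.2
  if PySem.Chars.islower char then
    let shift := if PySem.Int.mod i 2 == 0 then s1 else s2
    let new_char := Char.ofNat (PySem.Int.mod ((char.toNat : Int) - 97 - shift) 26 + 97).toNat
    acc ++ [new_char]
  else if PySem.Chars.isupper char then
    let shift := if PySem.Int.mod i 2 == 0 then s1 else s2
    let new_char := Char.ofNat (PySem.Int.mod ((char.toNat : Int) - 65 - shift) 26 + 65).toNat
    acc ++ [new_char]
  else acc ++ [char]

theorem pv_step_app (s1 s2 j : Int) (acc : List Char) (c : Char) :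
    pvBodyA s1 s2 acc (j, c) = acc ++ [pvStep (if j % 2 == 0 then s1 else s2) c] := by
  simp only [pvBodyA, pv_mod_two]
  by_cases hl : PySem.Chars.islower c <;> by_cases hu : PySem.Chars.isupper c <;>
    simp [pvStep, hl, hu]

theorem pv_A_loop (s1 s2 : Int) (l : List Char) (i : Int) (acc : List Char)
    (h : PySem.Int.mod i 2 = 0) :
    (PySem.List.enumerate l i).foldl
      (fun acc p =>
        let i := p.1
        let char := p.2
        if PySem.Chars.islower char then
          let shift := if PySem.Int.mod i 2 == 0 then s1 else s2
          let new_char := Char.ofNat (PySem.Int.mod ((char.toNat : Int) - 97 - shift) 26 + 97).toNat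
          acc ++ [new_char]
        else if PySem.Chars.isupper char then
          let shift := if PySem.Int.mod i 2 == 0 then s1 else s2
          let new_char := Char.ofNat (PySem.Int.mod ((char.toNat : Int) - 65 - shift) 26 + 65).toNat
          acc ++ [new_char]
        else acc ++ [char]) acc = acc ++ pvSpecList s1 s2 l := by
  rw [pv_mod_two] at h
  rw [show (fun (acc : List Char) (p : Int × Char) =>
        let i := p.1
        let char := p.2
        if PySem.Chars.islower char then
          let shift := if PySem.Int.mod i 2 == 0 then s1 else s2
          let new_char := Char.ofNat (PySem.Int.mod ((char.toNat : Int) - 97 - shift) 26 + 97).toNat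
          acc ++ [new_char]
        else if PySem.Chars.isupper char then
          let shift := if PySem.Int.mod i 2 == 0 then s1 else s2
          let new_char := Char.ofNat (PySem.Int.mod ((char.toNat : Int) - 65 - shift) 26 + 65).toNat
          acc ++ [new_char]
        else acc ++ [char]) = pvBodyA s1 s2 from rfl]
  induction l using pvSpecList.induct generalizing i acc with
  | case1 => simp [PySem.List.enumerate_nil, pvSpecList]
  | case2 a =>
    rw [PySem.List.enumerate_cons, PySem.List.enumerate_nil, List.foldl_cons, List.foldl_nil,
      pv_step_app]
    simp [pvSpecList, h]
  | case3 a b t ih =>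
    have h1 : ((i + 1) % 2 == 0) = false := by simp; omega
    have h2 : (i + 1 + 1) % 2 = 0 := by omega
    rw [PySem.List.enumerate_cons, PySem.List.enumerate_cons, List.foldl_cons, List.foldl_cons,
      pv_step_app, pv_step_app, ih (i + 1 + 1) _ h2]
    simp [pvSpecList, h, h1]

-- ===== VERDICT (by name: the statement is the Claim_ definition above) =====
theorem decrypt_function_spec : Claim_equal_decrypt_function := by
  intro text s1 s2 _
  show decrypt_function text s1 s2 = decrypt_function_alt text s1 s2
  unfold decrypt_function decrypt_function_alt
  rw [pv_A_loop s1 s2 text.toList 0 [] (by decide), pv_slice_evens, pv_slice_odds]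
  simp only [Option.getD_some, List.nil_append,
    show pvTranslate (pvTable s1) = pvStep s1 from funext (pv_translate_step s1),
    show pvTranslate (pvTable s2) = pvStep s2 from funext (pv_translate_step s2)]
  rw [pv_interleave s1 s2 text.toList]
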